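-- pv_equiv track=rewrite | github.com/j-p-c/alzheimer | setup.py | merge_hooks
-- ===== SOURCE A (Python) =====
-- def _is_alzheimer_hook(command):
--     """Check if a hook command belongs to alzheimer."""
--     return ("rebalance.py" in command or "guardrails.py" in command
--             or "reminders.py" in command)
--
-- def merge_hooks(existing_hooks, new_hooks):
--     """Merge new hooks into existing, avoiding duplicates.
--
--     For each event, checks if an alzheimer hook already exists
--     (by looking for 'rebalance.py' or 'guardrails.py' in the command).
--     If so, replaces it. If not, appends it.
--     """
--     merged = dict(existing_hooks)
--
--     for event, hook_groups in new_hooks.items():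
--         if event not in merged:
--             merged[event] = hook_groups
--             continue
--
--         # For each new hook group, find and replace existing alzheimer
--         # hook or append.
--         existing_groups = merged[event]
--         for new_group in hook_groups:
--             # Determine if this new group is an alzheimer hook.
--             new_cmd = ""
--             for hook in new_group.get("hooks", []):
--                 new_cmd = hook.get("command", "")
--                 if _is_alzheimer_hook(new_cmd):
--                     break
--
--             if not _is_alzheimer_hook(new_cmd):
--                 existing_groups.append(new_group)
--                 continue
--
--             # Find the matching existing alzheimer hook to replace.
--             # Match by the specific script name to avoid cross-replacement.
--             if "guardrails.py" in new_cmd: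
--                 script = "guardrails.py"
--             elif "reminders.py" in new_cmd:
--                 script = "reminders.py"
--             else:
--                 script = "rebalance.py"
--             replaced = False
--             for i, group in enumerate(existing_groups):
--                 for hook in group.get("hooks", []):
--                     if script in hook.get("command", ""):
--                         existing_groups[i] = new_group
--                         replaced = True
--                         break
--                 if replaced:
--                     break
--
--             if not replaced:
--                 existing_groups.append(new_group)
--
--     return merged
-- ===== SOURCE B (Python) =====
-- SCRIPTS = ("guardrails.py", "reminders.py", "rebalance.py")
--
--
-- def _script_of(group):
--     """The alzheimer script this new group carries, or None.
--
--     Mirrors the spec: the first hook command that is an alzheimer command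
--     decides, and within it guardrails > reminders > rebalance.
--     """
--     for hook in group.get("hooks", []):
--         cmd = hook.get("command", "")
--         for s in SCRIPTS:
--             if s in cmd:
--                 return next(t for t in SCRIPTS if t in cmd)
--     return None
--
--
-- def _scripts_in(group):
--     return {s for s in SCRIPTS
--             if any(s in h.get("command", "") for h in group.get("hooks", []))}
--
--
-- def merge_hooks(existing_hooks, new_hooks):
--     """Merge new hooks into existing, avoiding duplicates.
--
--     One pass per event over the new groups, using an inverted index
--     script -> positions instead of rescanning the existing groups.
--     """
--     merged = dict(existing_hooks)
--
--     for event, new_groups in new_hooks.items():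
--         if event not in merged:
--             merged[event] = new_groups
--             continue
--
--         groups = merged[event]
--         # Inverted index: script name -> set of positions containing it.
--         occ = {s: {i for i, g in enumerate(groups) if s in _scripts_in(g)}
--                for s in SCRIPTS}
--
--         for ng in new_groups:
--             script = _script_of(ng)
--             if script is None:
--                 groups.append(ng)  # carries no script: index unchanged
--                 continue
--             pos = min(occ[script], default=None)
--             if pos is None:
--                 pos = len(groups)
--                 groups.append(ng)
--             else:
--                 groups[pos] = ng
--                 for s in SCRIPTS:
--                     occ[s].discard(pos)
--             for s in _scripts_in(ng):
--                 occ[s].add(pos)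
--
--     return merged
-- ===== Notes on version B (the rewrite author's own statement) =====
-- stated objective: alternative
-- what changed: B replaces A's per-new-group rescan of the existing groups (and the last-match replace scan) with an inverted index script-name -> set of positions built once per event; each new group is then placed by a min-lookup in the index, which is updated in place on replace/append.
import Mathlib
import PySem

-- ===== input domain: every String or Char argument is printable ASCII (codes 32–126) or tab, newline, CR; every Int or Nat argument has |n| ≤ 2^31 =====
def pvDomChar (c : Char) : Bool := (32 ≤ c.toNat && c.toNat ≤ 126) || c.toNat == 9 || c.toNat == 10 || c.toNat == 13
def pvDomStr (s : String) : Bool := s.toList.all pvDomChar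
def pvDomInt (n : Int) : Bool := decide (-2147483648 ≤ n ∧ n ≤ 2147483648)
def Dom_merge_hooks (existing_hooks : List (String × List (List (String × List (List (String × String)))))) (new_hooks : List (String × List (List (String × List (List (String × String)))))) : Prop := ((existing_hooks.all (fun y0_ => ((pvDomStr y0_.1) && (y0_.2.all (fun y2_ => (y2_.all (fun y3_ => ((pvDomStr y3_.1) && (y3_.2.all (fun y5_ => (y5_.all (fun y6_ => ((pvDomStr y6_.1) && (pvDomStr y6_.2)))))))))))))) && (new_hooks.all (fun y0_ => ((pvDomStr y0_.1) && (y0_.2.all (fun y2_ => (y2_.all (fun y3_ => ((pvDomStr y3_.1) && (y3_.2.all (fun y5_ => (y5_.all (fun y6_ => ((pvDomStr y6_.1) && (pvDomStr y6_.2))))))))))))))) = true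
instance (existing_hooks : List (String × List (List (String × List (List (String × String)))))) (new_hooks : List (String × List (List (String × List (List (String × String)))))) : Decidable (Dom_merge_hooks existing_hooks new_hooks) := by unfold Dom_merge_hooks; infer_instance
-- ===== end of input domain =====

-- B replaces A's per-new-group rescan of the existing groups by an inverted index
-- (script name -> set of positions) built once per event; equivalence is about the
-- RETURN value only (Python A mutates the group lists inside existing_hooks in place).

abbrev PVHook := List (String × String)
abbrev PVGroup := List (String × List PVHook)
abbrev PVGroups := List PVGroup

-- shared tiny accessors (hook.get("command",""), group.get("hooks",[]), _is_alzheimer_hook)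
def pvCmd (h : PVHook) : String := (PySem.Dict.mk h).getD "command" ""
def pvHooksOf (g : PVGroup) : List PVHook := (PySem.Dict.mk g).getD "hooks" []
def pvIsAlz (c : String) : Bool :=
  PySem.Str.isIn "rebalance.py" c || PySem.Str.isIn "guardrails.py" c || PySem.Str.isIn "reminders.py" c

-- ===== PORT A =====
-- the new_cmd loop: walk the hooks, remember the last command, break on the first alzheimer one
def pvNewCmdA : List PVHook → String → String
  | [], c => c
  | h :: rest, _ =>
    let c := pvCmd h
    if pvIsAlz c then c else pvNewCmdA rest c

-- the script-selection chain of A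
def pvScriptName (c : String) : String :=
  if PySem.Str.isIn "guardrails.py" c then "guardrails.py"
  else if PySem.Str.isIn "reminders.py" c then "reminders.py"
  else "rebalance.py"

-- the enumerate-scan: replace the first group one of whose hook commands contains `script`
def pvReplaceA (script : String) (ng : PVGroup) : PVGroups → Option PVGroups
  | [] => none
  | g :: rest =>
    if (pvHooksOf g).any (fun h => PySem.Str.isIn script (pvCmd h)) then some (ng :: rest)
    else match pvReplaceA script ng rest with
         | some r => some (g :: r)
         | none => none

def pvStepA (gs : PVGroups) (ng : PVGroup) : PVGroups :=
  let c := pvNewCmdA (pvHooksOf ng) ""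
  if !(pvIsAlz c) then gs ++ [ng]
  else match pvReplaceA (pvScriptName c) ng gs with
       | some r => r
       | none => gs ++ [ng]

def merge_hooks (existing_hooks : List (String × List (List (String × List (List (String × String)))))) (new_hooks : List (String × List (List (String × List (List (String × String)))))) : List (String × List (List (String × List (List (String × String))))) :=
  (new_hooks.foldl
    (fun (m : PySem.Dict String PVGroups) ev =>
      if !(m.contains ev.1) then m.insert ev.1 ev.2
      else m.insert ev.1 (ev.2.foldl pvStepA (m.getD ev.1 [])))
    (PySem.Dict.ofList existing_hooks)).items

-- ===== PORT B =====
def pvScripts : List String := ["guardrails.py", "reminders.py", "rebalance.py"]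

-- _script_of: first hook whose command contains an alzheimer script decides; first matching script wins
def pvScriptOf : List PVHook → Option String
  | [] => none
  | h :: rest =>
    match pvScripts.find? (fun s => PySem.Str.isIn s (pvCmd h)) with
    | some s => some s
    | none => pvScriptOf rest

-- _scripts_in: the set of alzheimer scripts occurring anywhere in the group's hook commands
def pvScriptsIn (g : PVGroup) : PySem.Set String :=
  PySem.Set.ofList (pvScripts.filter (fun s => (pvHooksOf g).any (fun h => PySem.Str.isIn s (pvCmd h))))

def pvOccAdd (occ : PySem.Dict String (PySem.Set Nat)) (g : PVGroup) (pos : Nat) : PySem.Dict String (PySem.Set Nat) :=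
  (pvScriptsIn g).foldl (fun o s => o.modify s [] (fun t => PySem.Set.add t pos)) occ

-- the inverted index: script -> set of positions of groups containing it
def pvOccInit (gs : PVGroups) : PySem.Dict String (PySem.Set Nat) :=
  (gs.zipIdx.foldl (fun occ gi => pvOccAdd occ gi.1 gi.2)
    (PySem.Dict.ofList (pvScripts.map (fun s => (s, ([] : PySem.Set Nat))))))

def pvStepB (st : PVGroups × PySem.Dict String (PySem.Set Nat)) (ng : PVGroup) : PVGroups × PySem.Dict String (PySem.Set Nat) :=
  match pvScriptOf (pvHooksOf ng) with
  | none => (st.1 ++ [ng], st.2)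
  | some script =>
    match PySem.List.min? (st.2.getD script []) (fun i => i) with
    | none => (st.1 ++ [ng], pvOccAdd st.2 ng st.1.length)
    | some pos =>
      (st.1.set pos ng,
       pvOccAdd (pvScripts.foldl (fun o s => o.modify s [] (fun t => PySem.Set.discard t pos)) st.2) ng pos)

def merge_hooks_alt (existing_hooks : List (String × List (List (String × List (List (String × String)))))) (new_hooks : List (String × List (List (String × List (List (String × String)))))) : List (String × List (List (String × List (List (String × String))))) :=
  (new_hooks.foldl
    (fun (m : PySem.Dict String PVGroups) ev =>
      if !(m.contains ev.1) then m.insert ev.1 ev.2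
      else
        let gs := m.getD ev.1 []
        m.insert ev.1 ((ev.2.foldl pvStepB (gs, pvOccInit gs)).1))
    (PySem.Dict.ofList existing_hooks)).items

-- ===== PRECONDITION & SPEC =====
def Spec_merge_hooks (existing_hooks : List (String × List (List (String × List (List (String × String)))))) (new_hooks : List (String × List (List (String × List (List (String × String)))))) (out : List (String × List (List (String × List (List (String × String)))))) : Prop := out = merge_hooks_alt existing_hooks new_hooks
instance (existing_hooks : List (String × List (List (String × List (List (String × String)))))) (new_hooks : List (String × List (List (String × List (List (String × String)))))) (out : List (String × List (List (String × List (List (String × String)))))) : Decidable (Spec_merge_hooks existing_hooks new_hooks out) := by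
  unfold Spec_merge_hooks
  letI d1 : DecidableEq (List (String × String)) := inferInstance
  letI d2 : DecidableEq (List (List (String × String))) := inferInstance
  letI d3 : DecidableEq (List (String × List (List (String × String)))) := inferInstance
  letI d4 : DecidableEq (List (List (String × List (List (String × String))))) := inferInstance
  infer_instance

-- ===== CLAIM (what is proved, stated in full; the proofs are below) =====
def Claim_equal_merge_hooks : Prop := ∀ (existing_hooks : List (String × List (List (String × List (List (String × String)))))) (new_hooks : List (String × List (List (String × List (List (String × String)))))), Dom_merge_hooks existing_hooks new_hooks → Spec_merge_hooks existing_hooks new_hooks (merge_hooks existing_hooks new_hooks)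

-- ===== LEMMAS AND PROOFS =====

def pvHas (s : String) (g : PVGroup) : Bool := (pvHooksOf g).any (fun h => PySem.Str.isIn s (pvCmd h))

def PVInv (gs : PVGroups) (occ : PySem.Dict String (PySem.Set Nat)) : Prop :=
  ∀ s ∈ pvScripts, ∀ i : Nat, (i ∈ occ.getD s [] ↔ ∃ h : i < gs.length, pvHas s gs[i] = true)

theorem pvScripts_nodup : pvScripts.Nodup := by decide

theorem mem_scriptsIn (s : String) (g : PVGroup) :
    s ∈ pvScriptsIn g ↔ s ∈ pvScripts ∧ pvHas s g = true := by
  simp [pvScriptsIn, PySem.Set.mem_ofList, List.mem_filter, pvHas]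

-- K0: the find? over the three scripts agrees with A's if-chain
theorem find?_scripts_of_alz (c : String) (h : pvIsAlz c = true) :
    pvScripts.find? (fun s => PySem.Str.isIn s c) = some (pvScriptName c) ∧ pvScriptName c ∈ pvScripts := by
  simp only [pvIsAlz, Bool.or_eq_true] at h
  simp only [pvScripts, pvScriptName, List.find?]
  rcases hg : PySem.Str.isIn "guardrails.py" c <;> rcases hr : PySem.Str.isIn "reminders.py" c <;>
    rcases hb : PySem.Str.isIn "rebalance.py" c <;> simp_all

theorem find?_scripts_of_not_alz (c : String) (h : pvIsAlz c = false) :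
    pvScripts.find? (fun s => PySem.Str.isIn s c) = none := by
  simp only [pvIsAlz, Bool.or_eq_false_iff] at h
  simp only [pvScripts, List.find?]
  rcases hg : PySem.Str.isIn "guardrails.py" c <;> rcases hr : PySem.Str.isIn "reminders.py" c <;>
    rcases hb : PySem.Str.isIn "rebalance.py" c <;> simp_all

-- K1: pvScriptOf decides A's "is alzheimer" test and names A's script
theorem scriptOf_spec : ∀ (hooks : List PVHook) (c : String), pvIsAlz c = false →
    (match pvScriptOf hooks with
     | none => pvIsAlz (pvNewCmdA hooks c) = false
     | some s => pvIsAlz (pvNewCmdA hooks c) = true ∧ s = pvScriptName (pvNewCmdA hooks c) ∧ s ∈ pvScripts) := by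
  intro hooks
  induction hooks with
  | nil => intro c hc; simpa [pvScriptOf, pvNewCmdA] using hc
  | cons h rest ih =>
    intro c hc
    by_cases ha : pvIsAlz (pvCmd h) = true
    · obtain ⟨hf, hm⟩ := find?_scripts_of_alz (pvCmd h) ha
      simp only [PySem.Str.isIn_eq] at hf
      simp [pvScriptOf, pvNewCmdA, hf, ha, hm]
    · have ha' : pvIsAlz (pvCmd h) = false := by simpa using ha
      have hf := find?_scripts_of_not_alz (pvCmd h) ha'
      have heq : pvScriptOf (h :: rest) = pvScriptOf rest := by
        simp only [pvScriptOf]; rw [hf]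
      have heq2 : pvNewCmdA (h :: rest) c = pvNewCmdA rest (pvCmd h) := by
        simp only [pvNewCmdA]; rw [ha']; simp
      rw [heq, heq2]
      exact ih (pvCmd h) ha'

-- K4: a group with no alzheimer hook contains no script at all
theorem scriptOf_none_no_script : ∀ (hooks : List PVHook), pvScriptOf hooks = none →
    ∀ s ∈ pvScripts, hooks.any (fun h => PySem.Str.isIn s (pvCmd h)) = false := by
  intro hooks
  induction hooks with
  | nil => simp
  | cons h rest ih =>
    intro hn s hs
    simp only [pvScriptOf] at hn
    rcases hf : pvScripts.find? (fun s => PySem.Str.isIn s (pvCmd h)) with _ | t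
    · rw [hf] at hn
      have h1 := List.find?_eq_none.mp hf s hs
      simp only [List.any_cons, Bool.or_eq_false_iff]
      exact ⟨by simpa using h1, ih hn s hs⟩
    · rw [hf] at hn; simp at hn

-- K2: A's replace scan characterised
theorem replaceA_none (s : String) (ng : PVGroup) : ∀ gs : PVGroups,
    (∀ g ∈ gs, pvHas s g = false) → pvReplaceA s ng gs = none := by
  intro gs
  induction gs with
  | nil => intro _; rfl
  | cons g rest ih =>
    intro hall
    have h0 : pvHas s g = false := hall g (by simp)
    simp only [pvReplaceA, pvHas] at *
    rw [h0, ih (fun g hg => hall g (by simp [hg]))]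
    simp

theorem replaceA_some (s : String) (ng : PVGroup) : ∀ (gs : PVGroups) (pos : Nat)
    (hlt : pos < gs.length), pvHas s gs[pos] = true →
    (∀ j (hj : j < gs.length), j < pos → pvHas s gs[j] = false) →
    pvReplaceA s ng gs = some (gs.set pos ng) := by
  intro gs
  induction gs with
  | nil => intro pos h; simp at h
  | cons g rest ih =>
    intro pos hlt hhas hmin
    match pos with
    | 0 =>
      simp only [List.getElem_cons_zero] at hhas
      simp only [pvReplaceA, pvHas] at *
      rw [hhas]
      simp
    | pos' + 1 =>
      have h0 : pvHas s g = false := hmin 0 (by simp) (by omega)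
      have hrec := ih pos' (by simpa using hlt) (by simpa using hhas)
        (fun j hj hjp => by
          have := hmin (j + 1) (by simpa using Nat.succ_lt_succ hj) (by omega)
          simpa using this)
      simp only [pvReplaceA, pvHas] at *
      rw [h0, hrec]
      simp

-- fold of modify/add over a nodup key list
theorem getD_addFold (l : List String) (hl : l.Nodup) (p : Nat) :
    ∀ (occ : PySem.Dict String (PySem.Set Nat)) (s : String),
    ((l.foldl (fun o t => o.modify t [] (fun st => PySem.Set.add st p)) occ).getD s []) =
      if s ∈ l then PySem.Set.add (occ.getD s []) p else occ.getD s [] := by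
  induction l with
  | nil => intro occ s; simp
  | cons t rest ih =>
    intro occ s
    have hrest : rest.Nodup := hl.of_cons
    simp only [List.foldl_cons]
    rw [ih hrest]
    by_cases hst : s = t
    · subst hst
      have hnr : s ∉ rest := by simpa using (List.nodup_cons.mp hl).1
      simp [hnr, PySem.Dict.getD_modify_self]
    · by_cases hsr : s ∈ rest
      · simp [hsr, hst, PySem.Dict.getD_modify_of_ne _ _ _ hst]
      · simp [hsr, hst, PySem.Dict.getD_modify_of_ne _ _ _ hst]

theorem getD_discardFold (l : List String) (hl : l.Nodup) (p : Nat) :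
    ∀ (occ : PySem.Dict String (PySem.Set Nat)) (s : String),
    ((l.foldl (fun o t => o.modify t [] (fun st => PySem.Set.discard st p)) occ).getD s []) =
      if s ∈ l then PySem.Set.discard (occ.getD s []) p else occ.getD s [] := by
  induction l with
  | nil => intro occ s; simp
  | cons t rest ih =>
    intro occ s
    have hrest : rest.Nodup := hl.of_cons
    simp only [List.foldl_cons]
    rw [ih hrest]
    by_cases hst : s = t
    · subst hst
      have hnr : s ∉ rest := by simpa using (List.nodup_cons.mp hl).1
      simp [hnr, PySem.Dict.getD_modify_self]
    · by_cases hsr : s ∈ rest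
      · simp [hsr, hst, PySem.Dict.getD_modify_of_ne _ _ _ hst]
      · simp [hsr, hst, PySem.Dict.getD_modify_of_ne _ _ _ hst]

theorem mem_occAdd (occ : PySem.Dict String (PySem.Set Nat)) (g : PVGroup) (p : Nat)
    (s : String) (hs : s ∈ pvScripts) (i : Nat) :
    i ∈ (pvOccAdd occ g p).getD s [] ↔ i ∈ occ.getD s [] ∨ (pvHas s g = true ∧ i = p) := by
  unfold pvOccAdd
  have hnd : (pvScriptsIn g).Nodup := by unfold pvScriptsIn; exact PySem.Set.nodup_ofList _
  rw [getD_addFold (pvScriptsIn g) hnd p]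
  by_cases hmem : s ∈ pvScriptsIn g
  · have := (mem_scriptsIn s g).mp hmem
    simp [hmem, PySem.Set.mem_add, this.2]
  · have : ¬ pvHas s g = true := fun hh => hmem ((mem_scriptsIn s g).mpr ⟨hs, hh⟩)
    simp [hmem, this]

-- building the index over zipIdx
theorem occInit_build : ∀ (tl : PVGroups) (k : Nat) (occ : PySem.Dict String (PySem.Set Nat))
    (P : String → Nat → Prop), (∀ s ∈ pvScripts, ∀ i, (i ∈ occ.getD s [] ↔ P s i)) →
    ∀ s ∈ pvScripts, ∀ i,
      (i ∈ (((tl.zipIdx k).foldl (fun occ gi => pvOccAdd occ gi.1 gi.2) occ).getD s []) ↔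
        (P s i ∨ ∃ j, ∃ _ : j < tl.length, i = k + j ∧ pvHas s tl[j] = true)) := by
  intro tl
  induction tl with
  | nil => intro k occ P hP s hs i; simpa using hP s hs i
  | cons g rest ih =>
    intro k occ P hP s hs i
    rw [List.zipIdx_cons, List.foldl_cons]
    have hstep : ∀ s ∈ pvScripts, ∀ i,
        (i ∈ (pvOccAdd occ g k).getD s [] ↔ (P s i ∨ (pvHas s g = true ∧ i = k))) := by
      intro s hs i
      rw [mem_occAdd occ g k s hs i, hP s hs i]
    rw [ih (k + 1) _ _ hstep s hs i]
    constructor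
    · rintro (⟨hp | ⟨hg, rfl⟩⟩ | ⟨j, hj, rfl, hh⟩)
      · exact Or.inl hp
      · exact Or.inr ⟨0, by simp, by omega, by simpa using hg⟩
      · exact Or.inr ⟨j + 1, by simpa using Nat.succ_lt_succ hj, by omega, by simpa using hh⟩
    · rintro (hp | ⟨j, hj, rfl, hh⟩)
      · exact Or.inl (Or.inl hp)
      · match j with
        | 0 => exact Or.inl (Or.inr ⟨by simpa using hh, by omega⟩)
        | j' + 1 =>
          exact Or.inr ⟨j', by simpa using hj, by omega, by simpa using hh⟩

theorem getD_occEmpty (s : String) (hs : s ∈ pvScripts) :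
    (PySem.Dict.ofList (pvScripts.map (fun s => (s, ([] : PySem.Set Nat))))).getD s [] = [] := by
  fin_cases hs <;> rfl

theorem occInit_inv (gs : PVGroups) : PVInv gs (pvOccInit gs) := by
  intro s hs i
  unfold pvOccInit
  rw [occInit_build gs 0 _ (fun _ _ => False)
    (fun s hs i => by rw [getD_occEmpty s hs]; simp) s hs i]
  constructor
  · rintro (h | ⟨j, hj, rfl, hh⟩)
    · exact h.elim
    · exact ⟨by simpa using hj, by simpa using hh⟩
  · rintro ⟨hlt, hh⟩
    exact Or.inr ⟨i, hlt, by omega, hh⟩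

-- one step: B's indexed step agrees with A's scanning step and preserves the invariant
theorem step_agree (gs : PVGroups) (occ : PySem.Dict String (PySem.Set Nat)) (ng : PVGroup)
    (hinv : PVInv gs occ) :
    (pvStepB (gs, occ) ng).1 = pvStepA gs ng ∧ PVInv (pvStepA gs ng) (pvStepB (gs, occ) ng).2 := by
  have hempty : pvIsAlz "" = false := by decide
  have hk1 := scriptOf_spec (pvHooksOf ng) "" hempty
  rcases hso : pvScriptOf (pvHooksOf ng) with _ | script
  · -- no alzheimer hook: both append, index unchanged
    rw [hso] at hk1
    have hstepA : pvStepA gs ng = gs ++ [ng] := by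
      simp only [pvStepA]; rw [hk1]; simp
    have hnos := scriptOf_none_no_script (pvHooksOf ng) hso
    refine ⟨by simp [pvStepB, hso, hstepA], ?_⟩
    rw [hstepA]
    intro s hs i
    simp only [pvStepB, hso]
    rw [hinv s hs i]
    constructor
    · rintro ⟨hlt, hh⟩
      exact ⟨by simp; omega, by rw [List.getElem_append_left hlt]; exact hh⟩
    · rintro ⟨hlt, hh⟩
      by_cases hi : i < gs.length
      · exact ⟨hi, by rwa [List.getElem_append_left hi] at hh⟩
      · have : i = gs.length := by simp at hlt; omega
        subst this
        rw [List.getElem_append_right (le_refl _)] at hh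
        simp only [Nat.sub_self, List.getElem_cons_zero] at hh
        unfold pvHas at hh
        rw [hnos s hs] at hh
        exact absurd hh (by simp)
  · -- alzheimer hook with script `script`
    rw [hso] at hk1
    obtain ⟨halz, hname, hmem⟩ := hk1
    have hstepA : pvStepA gs ng =
        match pvReplaceA script ng gs with
        | some r => r
        | none => gs ++ [ng] := by
      simp only [pvStepA]
      rw [halz, ← hname]
      simp
    rcases hmin : PySem.List.min? (occ.getD script []) (fun i => i) with _ | pos
    · -- index empty for script: no existing group has it; append
      have hemp : occ.getD script [] = [] := (PySem.List.min?_eq_none_iff _ _).mp hmin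
      have hnone : pvReplaceA script ng gs = none := by
        apply replaceA_none
        intro g hg
        by_contra hh
        simp only [Bool.not_eq_false] at hh
        obtain ⟨j, hj, hgj⟩ := List.mem_iff_getElem.mp hg
        have := (hinv script hmem j).mpr ⟨hj, by rwa [hgj]⟩
        rw [hemp] at this; simp at this
      have hA : pvStepA gs ng = gs ++ [ng] := by rw [hstepA, hnone]
      refine ⟨by simp [pvStepB, hso, hmin, hA], ?_⟩
      rw [hA]
      intro s hs i
      simp only [pvStepB, hso, hmin]
      rw [mem_occAdd _ _ _ s hs i, hinv s hs i]
      constructor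
      · rintro (⟨hlt, hh⟩ | ⟨hh, rfl⟩)
        · exact ⟨by simp; omega, by rw [List.getElem_append_left hlt]; exact hh⟩
        · refine ⟨by simp, ?_⟩
          rw [List.getElem_append_right (le_refl _)]
          simpa using hh
      · rintro ⟨hlt, hh⟩
        by_cases hi : i < gs.length
        · exact Or.inl ⟨hi, by rwa [List.getElem_append_left hi] at hh⟩
        · have : i = gs.length := by simp at hlt; omega
          subst this
          rw [List.getElem_append_right (le_refl _)] at hh
          simp only [Nat.sub_self, List.getElem_cons_zero] at hh
          exact Or.inr ⟨hh, rfl⟩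
    · -- index names the first position containing the script: replace there
      have hposmem : pos ∈ occ.getD script [] := PySem.List.min?_mem hmin
      obtain ⟨hposlt, hposhas⟩ := (hinv script hmem pos).mp hposmem
      have hminimal : ∀ j (hj : j < gs.length), j < pos → pvHas script gs[j] = false := by
        intro j hj hjp
        by_contra hh
        simp only [Bool.not_eq_false] at hh
        have hjmem := (hinv script hmem j).mpr ⟨hj, hh⟩
        have := PySem.List.min?_isMin hmin j hjmem
        omega
      have hrepl := replaceA_some script ng gs pos hposlt hposhas hminimal
      have hA : pvStepA gs ng = gs.set pos ng := by rw [hstepA, hrepl]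
      refine ⟨by simp [pvStepB, hso, hmin, hA], ?_⟩
      rw [hA]
      intro s hs i
      simp only [pvStepB, hso, hmin]
      rw [mem_occAdd _ _ _ s hs i,
        getD_discardFold pvScripts pvScripts_nodup pos _ s]
      simp only [hs, if_pos, PySem.Set.mem_discard]
      rw [hinv s hs i]
      constructor
      · rintro (⟨⟨hlt, hh⟩, hne⟩ | ⟨hh, rfl⟩)
        · refine ⟨by simpa using hlt, ?_⟩
          rw [List.getElem_set_ne (by omega)]
          exact hh
        · exact ⟨by simpa using hposlt, by rw [List.getElem_set_self (by simpa using hposlt)]; exact hh⟩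
      · rintro ⟨hlt, hh⟩
        have hlt' : i < gs.length := by simpa using hlt
        by_cases hip : i = pos
        · subst hip
          rw [List.getElem_set_self (by simpa using hlt')] at hh
          exact Or.inr ⟨hh, rfl⟩
        · rw [List.getElem_set_ne (by omega)] at hh
          exact Or.inl ⟨⟨hlt', hh⟩, hip⟩

-- the per-event loops agree
theorem event_loop_agree : ∀ (ngs : PVGroups) (gs : PVGroups) (occ : PySem.Dict String (PySem.Set Nat)),
    PVInv gs occ → (ngs.foldl pvStepB (gs, occ)).1 = ngs.foldl pvStepA gs := by
  intro ngs
  induction ngs with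
  | nil => intro gs occ _; rfl
  | cons ng rest ih =>
    intro gs occ hinv
    obtain ⟨heq, hinv'⟩ := step_agree gs occ ng hinv
    simp only [List.foldl_cons]
    have : pvStepB (gs, occ) ng = ((pvStepB (gs, occ) ng).1, (pvStepB (gs, occ) ng).2) := rfl
    rw [this, heq]
    exact ih _ _ hinv'

-- ===== VERDICT (by name: the statement is the Claim_ definition above) =====
theorem merge_hooks_spec : Claim_equal_merge_hooks := by
  intro existing_hooks new_hooks _
  unfold Spec_merge_hooks merge_hooks merge_hooks_alt
  congr 1
  apply PySem.List.foldl_congr_mem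
  intro m ev _
  by_cases hc : m.contains ev.1 = true
  · have he := event_loop_agree ev.2 (m.getD ev.1 []) (pvOccInit (m.getD ev.1 [])) (occInit_inv _)
    simp [hc, he]
  · simp [hc]
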